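-- pv_equiv track=rewrite | github.com/Xavman42/GuitaRPG | NeoScore/Plevel.py | apply_area_modifier
-- ===== SOURCE A (Python) =====
-- def apply_area_modifier(cell_dict, area):
--     default_mod = 1
--     area_mod_value = 10
--     for i, j in cell_dict.items():
--         j[2] = default_mod
--     if area == 1:
--         cell_dict['scrape_rank_1'][2] = area_mod_value
--         cell_dict['scrape_rank_2'][2] = area_mod_value
--         cell_dict['scrape_rank_3'][2] = area_mod_value
--         cell_dict['scrape_rank_4'][2] = area_mod_value
--         cell_dict['bartok_rank_1'][2] = area_mod_value
--         cell_dict['bartok_rank_2'][2] = area_mod_value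
--         cell_dict['bartok_rank_3'][2] = area_mod_value
--         cell_dict['bartok_rank_4'][2] = area_mod_value
--         cell_dict['tambura_rank_1'][2] = area_mod_value
--         cell_dict['tambura_rank_2'][2] = area_mod_value
--         cell_dict['tambura_rank_3'][2] = area_mod_value
--         cell_dict['tambura_rank_4'][2] = area_mod_value
--         cell_dict['perc_rank_1'][2] = area_mod_value
--         cell_dict['perc_rank_2'][2] = area_mod_value
--         cell_dict['perc_rank_3'][2] = area_mod_value
--         cell_dict['perc_rank_4'][2] = area_mod_value
--
--     elif area == 2:
--         cell_dict['triad_rank_1'][2] = area_mod_value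
--         cell_dict['triad_rank_2'][2] = area_mod_value
--         cell_dict['triad_rank_3'][2] = area_mod_value
--         cell_dict['triad_rank_4'][2] = area_mod_value
--         cell_dict['melody_rank_1'][2] = area_mod_value
--         cell_dict['melody_rank_2'][2] = area_mod_value
--         cell_dict['melody_rank_3'][2] = area_mod_value
--         cell_dict['melody_rank_4'][2] = area_mod_value
--         cell_dict['harmonic_rank_1'][2] = area_mod_value
--         cell_dict['harmonic_rank_2'][2] = area_mod_value
--         cell_dict['harmonic_rank_3'][2] = area_mod_value
--         cell_dict['harmonic_rank_4'][2] = area_mod_value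
--         cell_dict['rake_rank_1'][2] = area_mod_value
--         cell_dict['rake_rank_2'][2] = area_mod_value
--         cell_dict['rake_rank_3'][2] = area_mod_value
--         cell_dict['rake_rank_4'][2] = area_mod_value
--
--     elif area == 3:
--         cell_dict['tremolo_rank_1'][2] = area_mod_value
--         cell_dict['tremolo_rank_2'][2] = area_mod_value
--         cell_dict['tremolo_rank_3'][2] = area_mod_value
--         cell_dict['tremolo_rank_4'][2] = area_mod_value
--         cell_dict['adv_harm_rank_1'][2] = area_mod_value
--         cell_dict['adv_harm_rank_2'][2] = area_mod_value
--         cell_dict['adv_harm_rank_3'][2] = area_mod_value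
--         cell_dict['adv_harm_rank_4'][2] = area_mod_value
--     return cell_dict
-- ===== SOURCE B (Python) =====
-- _RANKS = range(1, 5)
-- AREA_KEYS = {
--     1: {f'{p}_rank_{r}' for p in ('scrape', 'bartok', 'tambura', 'perc') for r in _RANKS},
--     2: {f'{p}_rank_{r}' for p in ('triad', 'melody', 'harmonic', 'rake') for r in _RANKS},
--     3: {f'{p}_rank_{r}' for p in ('tremolo', 'adv_harm') for r in _RANKS},
-- }
--
--
-- def apply_area_modifier(cell_dict, area):
--     hot = AREA_KEYS.get(area, set())
--     for k, v in cell_dict.items():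
--         v[2] = 10 if k in hot else 1
--     return cell_dict
-- ===== Notes on version B (the rewrite author's own statement) =====
-- stated objective: simpler
-- what changed: Instead of A's two-stage mutation (reset every entry, then look up 8-16 hard-coded keys in the dict and overwrite them), B never looks up a key: it classifies each entry in one sweep against a precomputed area->key-set table, writing 10 or 1 per entry.
-- crash fix: On dicts whose values all have length >= 3 but which are missing one of the area's required keys (area in {1,2,3}), A raises KeyError while B returns the classified dict. — e.g. on apply_area_modifier([("x", [5, 6, 7])], 3): A raises KeyError, B returns [("x", [5, 6, 1])]
import Mathlib
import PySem

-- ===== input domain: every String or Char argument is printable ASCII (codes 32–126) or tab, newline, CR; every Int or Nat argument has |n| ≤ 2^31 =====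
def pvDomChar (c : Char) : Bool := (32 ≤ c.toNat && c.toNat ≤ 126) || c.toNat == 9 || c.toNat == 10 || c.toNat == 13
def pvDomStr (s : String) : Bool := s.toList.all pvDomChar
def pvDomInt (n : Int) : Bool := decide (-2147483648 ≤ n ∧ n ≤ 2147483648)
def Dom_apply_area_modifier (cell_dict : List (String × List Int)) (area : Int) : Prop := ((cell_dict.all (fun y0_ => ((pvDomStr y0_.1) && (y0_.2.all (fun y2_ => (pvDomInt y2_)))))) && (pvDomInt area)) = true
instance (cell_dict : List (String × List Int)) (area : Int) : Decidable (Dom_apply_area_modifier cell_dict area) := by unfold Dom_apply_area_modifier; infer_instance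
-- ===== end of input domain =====

-- B replaces A's two-stage mutation (reset all entries, then overwrite 8-16 hard-coded keys
-- looked up in the dict) by one classification sweep: each entry's slot 2 is set to 10 or 1
-- according to membership of its key in a precomputed area->key-set table (objective: simpler).
-- NOTE: Python A mutates cell_dict's value lists in place; the equivalence proved here is
-- about the RETURN value only (B performs the same mutation).

-- ===== PORT A =====
-- cell_dict[key][2] = 10 : set index 2 of the first entry with that key (KeyError excluded by Pre_)
def pvAssignA (d : List (String × List Int)) (key : String) : List (String × List Int) :=
  match d with
  | [] => []
  | (k, v) :: rest => if k = key then (k, v.set 2 10) :: rest else (k, v) :: pvAssignA rest key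

def apply_area_modifier (cell_dict : List (String × List Int)) (area : Int) : List (String × List Int) :=
  -- for i, j in cell_dict.items(): j[2] = default_mod  (IndexError for len < 3 excluded by Pre_)
  let d1 := cell_dict.map (fun kv => (kv.1, kv.2.set 2 1))
  if area = 1 then
    (pvAssignA (pvAssignA (pvAssignA (pvAssignA (pvAssignA (pvAssignA (pvAssignA (pvAssignA (pvAssignA (pvAssignA (pvAssignA (pvAssignA (pvAssignA (pvAssignA (pvAssignA (pvAssignA d1 "scrape_rank_1") "scrape_rank_2") "scrape_rank_3") "scrape_rank_4") "bartok_rank_1") "bartok_rank_2") "bartok_rank_3") "bartok_rank_4") "tambura_rank_1") "tambura_rank_2") "tambura_rank_3") "tambura_rank_4") "perc_rank_1") "perc_rank_2") "perc_rank_3") "perc_rank_4")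
  else if area = 2 then
    (pvAssignA (pvAssignA (pvAssignA (pvAssignA (pvAssignA (pvAssignA (pvAssignA (pvAssignA (pvAssignA (pvAssignA (pvAssignA (pvAssignA (pvAssignA (pvAssignA (pvAssignA (pvAssignA d1 "triad_rank_1") "triad_rank_2") "triad_rank_3") "triad_rank_4") "melody_rank_1") "melody_rank_2") "melody_rank_3") "melody_rank_4") "harmonic_rank_1") "harmonic_rank_2") "harmonic_rank_3") "harmonic_rank_4") "rake_rank_1") "rake_rank_2") "rake_rank_3") "rake_rank_4")
  else if area = 3 then
    (pvAssignA (pvAssignA (pvAssignA (pvAssignA (pvAssignA (pvAssignA (pvAssignA (pvAssignA d1 "tremolo_rank_1") "tremolo_rank_2") "tremolo_rank_3") "tremolo_rank_4") "adv_harm_rank_1") "adv_harm_rank_2") "adv_harm_rank_3") "adv_harm_rank_4")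
  else d1

-- ===== PORT B =====
-- module-level AREA_KEYS = {1: {f'{p}_rank_{r}' ...}, 2: {...}, 3: {...}} (dict of sets)
def pvAreaKeys : PySem.Dict Int (PySem.Set String) :=
  PySem.Dict.ofList
    [ (1, PySem.Set.ofList (["scrape", "bartok", "tambura", "perc"].flatMap
          (fun p => (PySem.List.pyRange 1 5 1).map (fun r => p ++ "_rank_" ++ PySem.Int.toStr r)))),
      (2, PySem.Set.ofList (["triad", "melody", "harmonic", "rake"].flatMap
          (fun p => (PySem.List.pyRange 1 5 1).map (fun r => p ++ "_rank_" ++ PySem.Int.toStr r)))),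
      (3, PySem.Set.ofList (["tremolo", "adv_harm"].flatMap
          (fun p => (PySem.List.pyRange 1 5 1).map (fun r => p ++ "_rank_" ++ PySem.Int.toStr r)))) ]

def apply_area_modifier_alt (cell_dict : List (String × List Int)) (area : Int) : List (String × List Int) :=
  let hot := pvAreaKeys.getD area PySem.Set.empty
  -- for k, v in cell_dict.items(): v[2] = 10 if k in hot else 1   (IndexError excluded by Pre_)
  cell_dict.map (fun kv => (kv.1, kv.2.set 2 (if PySem.Set.contains hot kv.1 then 10 else 1)))

-- ===== PRECONDITION & SPEC =====
-- the keys A's branch for this area indexes into the dict (defined from literals, not the ports)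
def pvRequiredKeys (area : Int) : List String :=
  if area = 1 then ["scrape_rank_1", "scrape_rank_2", "scrape_rank_3", "scrape_rank_4", "bartok_rank_1", "bartok_rank_2", "bartok_rank_3", "bartok_rank_4", "tambura_rank_1", "tambura_rank_2", "tambura_rank_3", "tambura_rank_4", "perc_rank_1", "perc_rank_2", "perc_rank_3", "perc_rank_4"]
  else if area = 2 then ["triad_rank_1", "triad_rank_2", "triad_rank_3", "triad_rank_4", "melody_rank_1", "melody_rank_2", "melody_rank_3", "melody_rank_4", "harmonic_rank_1", "harmonic_rank_2", "harmonic_rank_3", "harmonic_rank_4", "rake_rank_1", "rake_rank_2", "rake_rank_3", "rake_rank_4"]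
  else if area = 3 then ["tremolo_rank_1", "tremolo_rank_2", "tremolo_rank_3", "tremolo_rank_4", "adv_harm_rank_1", "adv_harm_rank_2", "adv_harm_rank_3", "adv_harm_rank_4"]
  else []

-- Pre_ excludes (a) association lists with duplicate keys, which represent no Python dict
-- (first-match vs every-match update there is accidental), and exactly the inputs where
-- Python A raises: (b) a value list shorter than 3 (IndexError on j[2] = 1), (c) for
-- area 1/2/3 a required key missing (KeyError).
def Pre_apply_area_modifier (cell_dict : List (String × List Int)) (area : Int) : Prop :=
  (cell_dict.map Prod.fst).Nodup ∧
  (∀ kv ∈ cell_dict, 3 ≤ kv.2.length) ∧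
  (∀ k ∈ pvRequiredKeys area, k ∈ cell_dict.map Prod.fst)
instance (cell_dict : List (String × List Int)) (area : Int) : Decidable (Pre_apply_area_modifier cell_dict area) := by unfold Pre_apply_area_modifier; infer_instance
def pvWitness_apply_area_modifier : (List (String × List Int)) × Int := ([("other", [5, 6, 7])], 0)

-- On dicts whose values all have length >= 3 but which are missing one of the area's
-- required keys (area in {1,2,3}), A raises KeyError while B returns the classified dict.
def Raises_apply_area_modifier (cell_dict : List (String × List Int)) (area : Int) : Prop :=
  (∀ kv ∈ cell_dict, 3 ≤ kv.2.length) ∧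
  (∃ k ∈ pvRequiredKeys area, k ∉ cell_dict.map Prod.fst)
instance (cell_dict : List (String × List Int)) (area : Int) : Decidable (Raises_apply_area_modifier cell_dict area) := by unfold Raises_apply_area_modifier; infer_instance
def pvRaiseWitness_apply_area_modifier : (List (String × List Int)) × Int := ([("x", [5, 6, 7])], 3)
def pvRaiseWitnessOut_apply_area_modifier : List (String × List Int) := [("x", [5, 6, 1])]

def Spec_apply_area_modifier (cell_dict : List (String × List Int)) (area : Int) (out : List (String × List Int)) : Prop := out = apply_area_modifier_alt cell_dict area
instance (cell_dict : List (String × List Int)) (area : Int) (out : List (String × List Int)) : Decidable (Spec_apply_area_modifier cell_dict area out) := by unfold Spec_apply_area_modifier; infer_instance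

-- ===== CLAIM (what is proved, stated in full; the proofs are below) =====
def Claim_equal_apply_area_modifier : Prop := ∀ (cell_dict : List (String × List Int)) (area : Int), Dom_apply_area_modifier cell_dict area → Pre_apply_area_modifier cell_dict area → Spec_apply_area_modifier cell_dict area (apply_area_modifier cell_dict area)
def Claim_raises_apply_area_modifier : Prop := (∀ (cell_dict : List (String × List Int)) (area : Int), Dom_apply_area_modifier cell_dict area → Raises_apply_area_modifier cell_dict area → ¬ Pre_apply_area_modifier cell_dict area) ∧ (Dom_apply_area_modifier (pvRaiseWitness_apply_area_modifier.1) (pvRaiseWitness_apply_area_modifier.2) ∧ Raises_apply_area_modifier (pvRaiseWitness_apply_area_modifier.1) (pvRaiseWitness_apply_area_modifier.2) ∧ apply_area_modifier_alt (pvRaiseWitness_apply_area_modifier.1) (pvRaiseWitness_apply_area_modifier.2) = pvRaiseWitnessOut_apply_area_modifier)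

-- ===== LEMMAS AND PROOFS =====
-- with distinct keys, A's first-match in-place assignment is a map over the whole list
theorem pvAssignA_eq_map (d : List (String × List Int)) (key : String)
    (h : (d.map Prod.fst).Nodup) :
    pvAssignA d key = d.map (fun kv => if kv.1 = key then (kv.1, kv.2.set 2 10) else kv) := by
  induction d with
  | nil => rfl
  | cons kv rest ih =>
      obtain ⟨k, v⟩ := kv
      simp only [List.map_cons, List.nodup_cons] at h
      by_cases hk : k = key
      · subst hk
        have hrest : rest.map (fun kv => if kv.1 = k then (kv.1, kv.2.set 2 10) else kv) = rest := by
          apply List.map_congr_left ?_ |>.trans (List.map_id rest)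
          intro x hx
          have : x.1 ≠ k := by
            intro hxk; exact h.1 (hxk ▸ List.mem_map_of_mem hx)
          simp [this]
        simp [pvAssignA, hrest]
      · simp only [pvAssignA, List.map_cons, if_neg hk, ih h.2]

-- folding A's assignments over a key list is one classification map
theorem foldl_assign (keys : List String) (d : List (String × List Int))
    (hd : (d.map Prod.fst).Nodup) :
    keys.foldl pvAssignA d
      = d.map (fun kv => if kv.1 ∈ keys then (kv.1, kv.2.set 2 10) else kv) := by
  induction keys generalizing d with
  | nil => simp
  | cons key ks ih =>
      rw [List.foldl_cons, pvAssignA_eq_map d key hd]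
      have hd' : ((d.map (fun kv => if kv.1 = key then (kv.1, kv.2.set 2 10) else kv)).map Prod.fst).Nodup := by
        rw [List.map_map]
        have : (Prod.fst ∘ fun kv : String × List Int => if kv.1 = key then (kv.1, kv.2.set 2 10) else kv) = Prod.fst := by
          funext kv; by_cases h : kv.1 = key <;> simp [h]
        rw [this]; exact hd
      rw [ih _ hd', List.map_map]
      apply List.map_congr_left
      intro kv _
      by_cases h : kv.1 = key
      · simp [h, List.set_set]
      · simp [h]

-- composing the reset map with the classification map, against B's single sweep
theorem reset_then_classify (cell_dict : List (String × List Int)) (keys : List String) :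
    (cell_dict.map (fun kv => (kv.1, kv.2.set 2 1))).map
        (fun kv => if kv.1 ∈ keys then (kv.1, kv.2.set 2 10) else kv)
      = cell_dict.map (fun kv => (kv.1, kv.2.set 2 (if PySem.Set.contains keys kv.1 then 10 else 1))) := by
  rw [List.map_map]
  apply List.map_congr_left
  intro kv _
  by_cases h : kv.1 ∈ keys
  · simp [h, List.set_set, PySem.Set.contains]
  · simp [h, PySem.Set.contains]

theorem hot_one : pvAreaKeys.getD 1 PySem.Set.empty = pvRequiredKeys 1 := by decide
theorem hot_two : pvAreaKeys.getD 2 PySem.Set.empty = pvRequiredKeys 2 := by decide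
theorem hot_three : pvAreaKeys.getD 3 PySem.Set.empty = pvRequiredKeys 3 := by decide
theorem hot_other (area : Int) (h1 : area ≠ 1) (h2 : area ≠ 2) (h3 : area ≠ 3) :
    pvAreaKeys.getD area PySem.Set.empty = [] := by
  have e : pvAreaKeys = PySem.Dict.mk [(1, pvRequiredKeys 1), (2, pvRequiredKeys 2), (3, pvRequiredKeys 3)] := by decide
  simp [e, PySem.Dict.getD, PySem.Dict.get?, Ne.symm h1, Ne.symm h2, Ne.symm h3]

-- ===== VERDICT (by name: the statement is the Claim_ definition above) =====
theorem apply_area_modifier_spec : Claim_equal_apply_area_modifier := by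
  intro cell_dict area _ hpre
  obtain ⟨hnd, -, -⟩ := hpre
  unfold Spec_apply_area_modifier
  have hnd1 : ((cell_dict.map (fun kv => (kv.1, kv.2.set 2 1))).map Prod.fst).Nodup := by
    rw [List.map_map]; exact hnd
  by_cases h1 : area = 1
  · subst h1
    have h := foldl_assign (pvRequiredKeys 1) (cell_dict.map (fun kv => (kv.1, kv.2.set 2 1))) hnd1
    simp only [pvRequiredKeys, if_true, List.foldl_cons, List.foldl_nil] at h
    simp only [apply_area_modifier, apply_area_modifier_alt, if_true]
    rw [h, hot_one]
    simp only [pvRequiredKeys, if_true]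
    exact reset_then_classify _ _
  · by_cases h2 : area = 2
    · subst h2
      have h := foldl_assign (pvRequiredKeys 2) (cell_dict.map (fun kv => (kv.1, kv.2.set 2 1))) hnd1
      simp only [pvRequiredKeys, eq_false h1, if_false, if_true, List.foldl_cons, List.foldl_nil] at h
      simp only [apply_area_modifier, apply_area_modifier_alt, eq_false h1, if_false, if_true]
      rw [h, hot_two]
      simp only [pvRequiredKeys, eq_false h1, if_false, if_true]
      exact reset_then_classify _ _
    · by_cases h3 : area = 3
      · subst h3
        have h := foldl_assign (pvRequiredKeys 3) (cell_dict.map (fun kv => (kv.1, kv.2.set 2 1))) hnd1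
        simp only [pvRequiredKeys, eq_false h1, eq_false h2, if_false, if_true, List.foldl_cons, List.foldl_nil] at h
        simp only [apply_area_modifier, apply_area_modifier_alt, eq_false h1, eq_false h2, if_false, if_true]
        rw [h, hot_three]
        simp only [pvRequiredKeys, eq_false h1, eq_false h2, if_false, if_true]
        exact reset_then_classify _ _
      · simp only [apply_area_modifier, apply_area_modifier_alt, eq_false h1, eq_false h2, eq_false h3, if_false]
        rw [hot_other area h1 h2 h3]
        simp [PySem.Set.contains]

theorem apply_area_modifier_raises : Claim_raises_apply_area_modifier := by
  unfold Claim_raises_apply_area_modifier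
  refine ⟨?_, by decide⟩
  intro cell_dict area _ hr hpre
  obtain ⟨-, hmiss⟩ := hr
  obtain ⟨k, hk, hnot⟩ := hmiss
  exact hnot (hpre.2.2 k hk)

theorem pvRaiseWitness_ok :
    apply_area_modifier_alt pvRaiseWitness_apply_area_modifier.1 pvRaiseWitness_apply_area_modifier.2
      = pvRaiseWitnessOut_apply_area_modifier := by
  have h := apply_area_modifier_raises
  unfold Claim_raises_apply_area_modifier at h
  exact h.2.2.2
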